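-- pv_equiv track=rewrite | github.com/idarthjedi/braesec | scratch.py | convert
-- ===== SOURCE A (Python) =====
-- def convert(codechr):
--     find = {"'": 1, ".": 2,":": 3,"x": 0,"o": 16," ": 0,}
--     findr = {".": 4,"'": 8,":": 12," ": 0,}
--     ascv = 96
--     right = 0
--     for curchr in codechr:
--         if (curchr == "x") or (curchr == "o"):
--             right = 1
--             ascv += find[curchr]
--         elif right == 1:
--             ascv += findr[curchr]
--         else:
--             ascv += find[curchr]
--     return(chr(ascv))
-- ===== SOURCE B (Python) =====
-- def convert(codechr):
--     find = {"'": 1, ".": 2, ":": 3, "x": 0, "o": 16, " ": 0}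
--     findr = {".": 4, "'": 8, ":": 12, " ": 0}
--     i = next((k for k, c in enumerate(codechr) if c in "xo"), len(codechr))
--     total = 96
--     total += sum(find[c] for c in codechr[:i])
--     total += sum(find[c] if c in "xo" else findr[c] for c in codechr[i:])
--     return chr(total)
-- ===== Notes on version B (the rewrite author's own statement) =====
-- stated objective: alternative
-- what changed: B replaces A's stateful right-flag loop by splitting the string at the first 'x'/'o' indicator and summing table weights over the prefix (find) and the suffix (find for x/o, findr otherwise) in two comprehensions.
import Mathlib
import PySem

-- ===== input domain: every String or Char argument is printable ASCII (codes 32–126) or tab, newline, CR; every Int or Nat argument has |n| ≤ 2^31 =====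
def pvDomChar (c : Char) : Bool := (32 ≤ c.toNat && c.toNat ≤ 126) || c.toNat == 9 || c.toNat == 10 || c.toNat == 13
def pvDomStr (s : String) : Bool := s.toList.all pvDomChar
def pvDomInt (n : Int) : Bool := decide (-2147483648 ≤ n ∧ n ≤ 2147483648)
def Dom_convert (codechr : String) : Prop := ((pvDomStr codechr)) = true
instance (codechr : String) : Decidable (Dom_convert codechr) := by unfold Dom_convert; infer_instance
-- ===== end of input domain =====

-- B splits the string at the first 'x'/'o' indicator and sums table weights over the
-- prefix and suffix, instead of A's stateful right-flag loop. (objective: alternative)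

-- ===== PORT A =====
def findA : PySem.Dict Char Int :=
  PySem.Dict.ofList [('\'', 1), ('.', 2), (':', 3), ('x', 0), ('o', 16), (' ', 0)]

def findrA : PySem.Dict Char Int :=
  PySem.Dict.ofList [('.', 4), ('\'', 8), (':', 12), (' ', 0)]

-- lookups use getD _ 0; KeyError (char outside the dict) is excluded by Pre_convert
def convert (codechr : String) : String :=
  let st := codechr.toList.foldl
    (fun (p : Int × Int) curchr =>
      if curchr = 'x' ∨ curchr = 'o' then
        (p.1 + PySem.Dict.getD findA curchr 0, 1)
      else if p.2 = 1 then
        (p.1 + PySem.Dict.getD findrA curchr 0, p.2)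
      else
        (p.1 + PySem.Dict.getD findA curchr 0, p.2))
    ((96 : Int), (0 : Int))
  String.mk [Char.ofNat st.1.toNat]

-- ===== PORT B =====
def findB : PySem.Dict Char Int :=
  PySem.Dict.ofList [('\'', 1), ('.', 2), (':', 3), ('x', 0), ('o', 16), (' ', 0)]

def findrB : PySem.Dict Char Int :=
  PySem.Dict.ofList [('.', 4), ('\'', 8), (':', 12), (' ', 0)]

def convert_alt (codechr : String) : String :=
  let cs := codechr.toList
  let i := cs.findIdx (fun c => c == 'x' || c == 'o')   -- first indicator; = length if none
  let total : Int := 96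
    + ((cs.take i).map (fun c => PySem.Dict.getD findB c 0)).sum
    + ((cs.drop i).map (fun c =>
        if c == 'x' || c == 'o' then PySem.Dict.getD findB c 0
        else PySem.Dict.getD findrB c 0)).sum
  String.mk [Char.ofNat total.toNat]

-- ===== PRECONDITION & SPEC =====
-- Pre_ excludes exactly the strings containing a character outside "'.:xo ": A raises
-- KeyError on the first such character (in either lookup phase).
def Pre_convert (codechr : String) : Prop :=
  (codechr.toList.all
    (fun c => c == '\'' || c == '.' || c == ':' || c == 'x' || c == 'o' || c == ' ')) = true
instance (codechr : String) : Decidable (Pre_convert codechr) := by unfold Pre_convert; infer_instance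

def pvWitness_convert : String := "x.:o' "

def Spec_convert (codechr : String) (out : String) : Prop := out = convert_alt codechr
instance (codechr : String) (out : String) : Decidable (Spec_convert codechr out) := by unfold Spec_convert; infer_instance

-- ===== CLAIM (what is proved, stated in full; the proofs are below) =====
def Claim_equal_convert : Prop := ∀ (codechr : String), Dom_convert codechr → Pre_convert codechr → Spec_convert codechr (convert codechr)

-- ===== LEMMAS AND PROOFS =====

-- per-character weights of the two phases
def w0 (c : Char) : Int := PySem.Dict.getD findA c 0
def w1 (c : Char) : Int :=
  if c == 'x' || c == 'o' then PySem.Dict.getD findA c 0 else PySem.Dict.getD findrA c 0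

def stepA (p : Int × Int) (curchr : Char) : Int × Int :=
  if curchr = 'x' ∨ curchr = 'o' then
    (p.1 + PySem.Dict.getD findA curchr 0, 1)
  else if p.2 = 1 then
    (p.1 + PySem.Dict.getD findrA curchr 0, p.2)
  else
    (p.1 + PySem.Dict.getD findA curchr 0, p.2)

-- once the flag is set, every character is weighted by w1
theorem foldA_one (cs : List Char) (a : Int) :
    cs.foldl stepA (a, 1) = (a + (cs.map w1).sum, 1) := by
  induction cs generalizing a with
  | nil => simp
  | cons c cs ih =>
      by_cases h : c = 'x' ∨ c = 'o'
      · have hb : (c == 'x' || c == 'o') = true := by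
          rcases h with h | h <;> simp [h]
        simp [stepA, h, hb, ih, w1]
        omega
      · have hb : (c == 'x' || c == 'o') = false := by
          simp only [not_or] at h; simp [h]
        simp [stepA, h, hb, ih, w1]
        omega

-- before the flag is set, the fold splits at the first indicator
theorem foldA_zero (cs : List Char) (a : Int) :
    (cs.foldl stepA (a, 0)).1 =
      a + ((cs.take (cs.findIdx (fun c => c == 'x' || c == 'o'))).map w0).sum
        + ((cs.drop (cs.findIdx (fun c => c == 'x' || c == 'o'))).map w1).sum := by
  induction cs generalizing a with
  | nil => simp
  | cons c cs ih =>
      by_cases h : c = 'x' ∨ c = 'o'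
      · have hb : (c == 'x' || c == 'o') = true := by
          rcases h with h | h <;> simp [h]
        simp only [List.findIdx_cons, hb, cond_true, List.take_zero, List.drop_zero,
          List.foldl_cons, stepA, if_pos h]
        rw [foldA_one]
        simp [w1, hb]
        omega
      · have hb : (c == 'x' || c == 'o') = false := by
          simp only [not_or] at h; simp [h]
        simp only [List.findIdx_cons, hb, cond_false, List.foldl_cons, stepA, if_neg h]
        norm_num
        rw [ih]
        simp [w0]
        ring

theorem convert_eq_alt (codechr : String) : convert codechr = convert_alt codechr := by
  show String.mk [Char.ofNat ((codechr.toList.foldl stepA (96, 0)).1).toNat] = _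
  rw [foldA_zero]
  rfl

-- ===== VERDICT (by name: the statement is the Claim_ definition above) =====
theorem convert_spec : Claim_equal_convert := by
  intro codechr _ _
  unfold Spec_convert
  exact convert_eq_alt codechr
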